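-- pv_equiv track=rewrite | github.com/daniel-reich/ubiquitous-fiesta | bPzBa5JKvb6XFyKMs_10.py | get_primiera_score
-- ===== SOURCE A (Python) =====
-- def get_primiera_score(deck):
--   if len(set([x[1] for x in deck])) != 4: return 0
--   score = 40
--   cards = ["s", "c", "d", "h"]
--   for i in cards:
--     if "7"+i in deck: score += 11
--     elif "6"+i in deck: score += 8
--     elif "A"+i in deck: score += 6
--     elif "5"+i in deck: score += 5
--     elif "4"+i in deck: score += 4
--     elif "3"+i in deck: score += 3
--     elif "2"+i in deck: score += 2
--   return score
-- ===== SOURCE B (Python) =====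
-- def get_primiera_score(deck):
--     if len({x[1] for x in deck}) != 4:
--         return 0
--     values = {'7': 11, '6': 8, 'A': 6, '5': 5, '4': 4, '3': 3, '2': 2}
--     best = {}
--     for x in deck:
--         if len(x) == 2 and x[0] in values and x[1] in 'scdh':
--             v = values[x[0]]
--             if v > best.get(x[1], 0):
--                 best[x[1]] = v
--     return 40 + sum(best.get(s, 0) for s in 'scdh')
-- ===== Notes on version B (the rewrite author's own statement) =====
-- stated objective: simpler
-- what changed: Replaces the 28 constructed-string membership probes (7-way elif chain per suit, each scanning the deck) with a rank->value table and a single accumulating pass over the deck that keeps the best value per suit in a dict.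
import Mathlib
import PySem

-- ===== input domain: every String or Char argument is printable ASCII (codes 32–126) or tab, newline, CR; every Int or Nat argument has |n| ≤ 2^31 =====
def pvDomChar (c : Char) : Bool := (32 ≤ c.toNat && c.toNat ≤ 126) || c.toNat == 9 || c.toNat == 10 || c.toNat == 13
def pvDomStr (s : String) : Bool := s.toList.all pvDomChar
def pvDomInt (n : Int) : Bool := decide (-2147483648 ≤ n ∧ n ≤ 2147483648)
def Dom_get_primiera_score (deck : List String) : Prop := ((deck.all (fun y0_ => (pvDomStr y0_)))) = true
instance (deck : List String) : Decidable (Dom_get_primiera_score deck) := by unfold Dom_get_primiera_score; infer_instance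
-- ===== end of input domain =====

-- B makes one accumulating pass over the deck with a rank->value table instead of A's 28
-- per-suit membership probes; return values proved equal on all decks where A returns
-- (i.e. every card has at least 2 characters).

-- ===== PORT A =====

-- '"7"+i in deck': Python string equality, tested exactly on the code-point lists.
def pvMem (c : List Char) (deck : List String) : Bool := decide (c ∈ deck.map String.toList)

def get_primiera_score (deck : List String) : Int :=
  -- if len(set([x[1] for x in deck])) != 4: return 0
  if (PySem.Set.ofList (deck.map (fun x => PySem.Str.pyGet? x 1))).length ≠ 4 then 0
  else
    -- for i in cards: if "7"+i in deck: … elif … ; suits iterated as their single chars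
    (['s', 'c', 'd', 'h']).foldl (fun score i =>
      if pvMem ['7', i] deck then score + 11
      else if pvMem ['6', i] deck then score + 8
      else if pvMem ['A', i] deck then score + 6
      else if pvMem ['5', i] deck then score + 5
      else if pvMem ['4', i] deck then score + 4
      else if pvMem ['3', i] deck then score + 3
      else if pvMem ['2', i] deck then score + 2
      else score) 40

-- ===== PORT B =====

-- values = {…}: a dict literal with distinct keys is exactly its items list
def pvValues : PySem.Dict Char Int := PySem.Dict.mk
  [('7', 11), ('6', 8), ('A', 6), ('5', 5), ('4', 4), ('3', 3), ('2', 2)]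

def get_primiera_score_alt (deck : List String) : Int :=
  if (PySem.Set.ofList (deck.map (fun x => PySem.Str.pyGet? x 1))).length ≠ 4 then 0
  else
    -- one pass: best value per suit ('len(x)==2 and x[0] in values and x[1] in "scdh"')
    let best : PySem.Dict Char Int := deck.foldl (fun best x =>
      match x.toList with
      | [r, s] =>
        if PySem.Dict.contains pvValues r && decide (s ∈ ['s', 'c', 'd', 'h']) then
          let v := PySem.Dict.getD pvValues r 0
          if PySem.Dict.getD best s 0 < v then PySem.Dict.insert best s v else best
        else best
      | _ => best) PySem.Dict.empty
    40 + ((['s', 'c', 'd', 'h']).map (fun s => PySem.Dict.getD best s 0)).sum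

-- ===== PRECONDITION & SPEC =====
-- A (and B) raise IndexError at x[1] when some card has fewer than 2 characters.
def Pre_get_primiera_score (deck : List String) : Prop :=
  ∀ x ∈ deck, 2 ≤ x.toList.length
instance (deck : List String) : Decidable (Pre_get_primiera_score deck) := by
  unfold Pre_get_primiera_score; infer_instance

def pvWitness_get_primiera_score : List String := ["7s", "Ac", "3d", "2h", "Kh"]

def Spec_get_primiera_score (deck : List String) (out : Int) : Prop := out = get_primiera_score_alt deck
instance (deck : List String) (out : Int) : Decidable (Spec_get_primiera_score deck out) := by unfold Spec_get_primiera_score; infer_instance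

-- ===== CLAIM (what is proved, stated in full; the proofs are below) =====
def Claim_equal_get_primiera_score : Prop := ∀ (deck : List String), Dom_get_primiera_score deck → Pre_get_primiera_score deck → Spec_get_primiera_score deck (get_primiera_score deck)

-- ===== LEMMAS AND PROOFS =====

-- value of one card for suit s (0 if it is not a scoring card of that suit)
def pvCardVal (x : String) (s : Char) : Int :=
  match x.toList with
  | [r, s'] => if s' = s then PySem.Dict.getD pvValues r 0 else 0
  | _ => 0

-- best value over the deck for suit s
def pvM (deck : List String) (s : Char) : Int :=
  deck.foldr (fun x m => max (pvCardVal x s) m) 0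

-- A's elif chain value for suit s
def pvChain (deck : List String) (s : Char) : Int :=
  if pvMem ['7', s] deck then 11
  else if pvMem ['6', s] deck then 8
  else if pvMem ['A', s] deck then 6
  else if pvMem ['5', s] deck then 5
  else if pvMem ['4', s] deck then 4
  else if pvMem ['3', s] deck then 3
  else if pvMem ['2', s] deck then 2
  else 0

theorem pvMem_cons (c : List Char) (x : String) (xs : List String) :
    pvMem c (x :: xs) = (decide (c = x.toList) || pvMem c xs) := by
  simp [pvMem, List.mem_cons]

theorem pvValues_getD_of_not_contains (r : Char)
    (h : PySem.Dict.contains pvValues r = false) : PySem.Dict.getD pvValues r 0 = 0 := by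
  simp only [pvValues, PySem.Dict.contains, PySem.Dict.getD, PySem.Dict.get?_mk_cons] at *
  split_ifs at * <;> simp_all [PySem.Dict.get?]

theorem pvM_nonneg (xs : List String) (s : Char) : 0 ≤ pvM xs s := by
  induction xs with
  | nil => simp [pvM]
  | cons x t ih => exact le_trans ih (le_max_right _ _)

set_option maxHeartbeats 1000000 in
theorem pvChain_cons (x : String) (xs : List String) (s : Char) :
    pvChain (x :: xs) s = max (pvCardVal x s) (pvChain xs s) := by
  rcases hx : x.toList with _ | ⟨r, _ | ⟨s', _ | ⟨c3, rest⟩⟩⟩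
  · simp only [pvChain, pvCardVal, hx, pvMem_cons]
    simp; split_ifs <;> simp
  · simp only [pvChain, pvCardVal, hx, pvMem_cons]
    simp; split_ifs <;> simp
  · -- x.toList = [r, s']
    by_cases hss : s' = s
    · subst hss
      by_cases h7 : r = '7'
      · subst h7
        simp only [pvChain, pvCardVal, hx, pvMem_cons]
        simp
        split_ifs <;> decide
      · by_cases h6 : r = '6'
        · subst h6
          simp only [pvChain, pvCardVal, hx, pvMem_cons]
          simp [(by decide : ('7' : Char) ≠ '6')]
          split_ifs <;> decide
        · by_cases h5a : r = 'A'
          · subst h5a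
            simp only [pvChain, pvCardVal, hx, pvMem_cons]
            simp [(by decide : ('7' : Char) ≠ 'A'), (by decide : ('6' : Char) ≠ 'A')]
            split_ifs <;> decide
          · by_cases h5 : r = '5'
            · subst h5
              simp only [pvChain, pvCardVal, hx, pvMem_cons]
              simp [(by decide : ('7' : Char) ≠ '5'), (by decide : ('6' : Char) ≠ '5'),
                    (by decide : ('A' : Char) ≠ '5')]
              split_ifs <;> decide
            · by_cases h4 : r = '4'
              · subst h4
                simp only [pvChain, pvCardVal, hx, pvMem_cons]
                simp [(by decide : ('7' : Char) ≠ '4'), (by decide : ('6' : Char) ≠ '4'),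
                      (by decide : ('A' : Char) ≠ '4'), (by decide : ('5' : Char) ≠ '4')]
                split_ifs <;> decide
              · by_cases h3 : r = '3'
                · subst h3
                  simp only [pvChain, pvCardVal, hx, pvMem_cons]
                  simp [(by decide : ('7' : Char) ≠ '3'), (by decide : ('6' : Char) ≠ '3'),
                        (by decide : ('A' : Char) ≠ '3'), (by decide : ('5' : Char) ≠ '3'),
                        (by decide : ('4' : Char) ≠ '3')]
                  split_ifs <;> decide
                · by_cases h2 : r = '2'
                  · subst h2
                    simp only [pvChain, pvCardVal, hx, pvMem_cons]
                    simp [(by decide : ('7' : Char) ≠ '2'), (by decide : ('6' : Char) ≠ '2'),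
                          (by decide : ('A' : Char) ≠ '2'), (by decide : ('5' : Char) ≠ '2'),
                          (by decide : ('4' : Char) ≠ '2'), (by decide : ('3' : Char) ≠ '2')]
                    split_ifs <;> decide
                  · -- r is not a scoring rank
                    have hv : PySem.Dict.getD pvValues r 0 = 0 := by
                      simp only [pvValues, PySem.Dict.getD, PySem.Dict.get?_mk_cons]
                      simp [PySem.Dict.get?, (Ne.symm h7), (Ne.symm h6), (Ne.symm h5a),
                            (Ne.symm h5), (Ne.symm h4), (Ne.symm h3), (Ne.symm h2)]
                    simp only [pvChain, pvCardVal, hx, pvMem_cons, hv]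
                    simp [Ne.symm h7, Ne.symm h6, Ne.symm h5a, Ne.symm h5,
                          Ne.symm h4, Ne.symm h3, Ne.symm h2]
                    split_ifs <;> simp
    · -- suit of x is not s
      simp only [pvChain, pvCardVal, hx, pvMem_cons]
      simp [hss, Ne.symm hss]
      split_ifs <;> simp
  · -- cards longer than 2 characters never match a 2-character probe
    simp only [pvChain, pvCardVal, hx, pvMem_cons]
    simp; split_ifs <;> simp

theorem pvM_eq_pvChain (xs : List String) (s : Char) : pvM xs s = pvChain xs s := by
  induction xs with
  | nil => simp [pvM, pvChain, pvMem]
  | cons x t ih => rw [pvChain_cons, ← ih]; rfl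

theorem pvStep_getD (acc : PySem.Dict Char Int) (x : String) (s : Char)
    (hs : s ∈ (['s', 'c', 'd', 'h'] : List Char)) (h0 : 0 ≤ PySem.Dict.getD acc s 0) :
    PySem.Dict.getD
      ((fun best x =>
        match x.toList with
        | [r, s] =>
          if PySem.Dict.contains pvValues r && decide (s ∈ ['s', 'c', 'd', 'h']) then
            let v := PySem.Dict.getD pvValues r 0
            if PySem.Dict.getD best s 0 < v then PySem.Dict.insert best s v else best
          else best
        | _ => best) acc x) s 0 = max (PySem.Dict.getD acc s 0) (pvCardVal x s) := by
  rcases hx : x.toList with _ | ⟨r, _ | ⟨s', _ | ⟨c3, rest⟩⟩⟩ <;>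
    simp only [pvCardVal, hx] <;> try exact (max_eq_left h0).symm
  -- x.toList = [r, s']
  by_cases hss : s' = s
  · subst hss
    by_cases hc : (PySem.Dict.contains pvValues r && decide (s' ∈ ['s', 'c', 'd', 'h'])) = true
    · simp only [hc, if_true]
      split_ifs with hlt
      · rw [PySem.Dict.getD_insert_self]
        exact (max_eq_right (le_of_lt hlt)).symm
      · exact (max_eq_left (not_lt.mp hlt)).symm
    · simp only [hs, decide_true, Bool.and_true] at hc
      have hv : PySem.Dict.getD pvValues r 0 = 0 :=
        pvValues_getD_of_not_contains r (by simpa using hc)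
      simp only [Bool.not_eq_true] at hc
      simp only [hc, hv, Bool.false_and, Bool.false_eq_true, if_false]
      exact (max_eq_left h0).symm
  · simp only [if_neg hss]
    split_ifs with hc hlt
    · rw [PySem.Dict.getD_insert_of_ne acc _ 0 (Ne.symm hss)]
      exact (max_eq_left h0).symm
    · exact (max_eq_left h0).symm
    · exact (max_eq_left h0).symm

theorem pvFold_getD (xs : List String) (acc : PySem.Dict Char Int) (s : Char)
    (hs : s ∈ (['s', 'c', 'd', 'h'] : List Char)) (h0 : 0 ≤ PySem.Dict.getD acc s 0) :
    PySem.Dict.getD (xs.foldl (fun best x =>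
        match x.toList with
        | [r, s] =>
          if PySem.Dict.contains pvValues r && decide (s ∈ ['s', 'c', 'd', 'h']) then
            let v := PySem.Dict.getD pvValues r 0
            if PySem.Dict.getD best s 0 < v then PySem.Dict.insert best s v else best
          else best
        | _ => best) acc) s 0 = max (PySem.Dict.getD acc s 0) (pvM xs s) := by
  induction xs generalizing acc with
  | nil => simp only [List.foldl_nil, pvM, List.foldr_nil]; exact (max_eq_left h0).symm
  | cons x t ih =>
    have hstep := pvStep_getD acc x s hs h0
    have h0' : 0 ≤ PySem.Dict.getD ((fun best x =>
        match x.toList with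
        | [r, s] =>
          if PySem.Dict.contains pvValues r && decide (s ∈ ['s', 'c', 'd', 'h']) then
            let v := PySem.Dict.getD pvValues r 0
            if PySem.Dict.getD best s 0 < v then PySem.Dict.insert best s v else best
          else best
        | _ => best) acc x) s 0 := by
      rw [hstep]; exact le_max_of_le_left h0
    rw [List.foldl_cons, ih _ h0', hstep, max_assoc]
    rfl

-- ===== VERDICT (by name: the statement is the Claim_ definition above) =====
theorem get_primiera_score_spec : Claim_equal_get_primiera_score := by
  intro deck hdom hpre
  unfold Spec_get_primiera_score get_primiera_score get_primiera_score_alt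
  split_ifs with hg
  · rfl
  · have hB : ∀ s ∈ (['s', 'c', 'd', 'h'] : List Char),
        PySem.Dict.getD (deck.foldl (fun best x =>
          match x.toList with
          | [r, s] =>
            if PySem.Dict.contains pvValues r && decide (s ∈ ['s', 'c', 'd', 'h']) then
              let v := PySem.Dict.getD pvValues r 0
              if PySem.Dict.getD best s 0 < v then PySem.Dict.insert best s v else best
            else best
          | _ => best) PySem.Dict.empty) s 0 = pvChain deck s := by
      intro s hs
      rw [pvFold_getD deck PySem.Dict.empty s hs (by norm_num [PySem.Dict.getD, PySem.Dict.get?, PySem.Dict.empty])]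
      rw [show PySem.Dict.getD (PySem.Dict.empty : PySem.Dict Char Int) s 0 = 0 from rfl]
      rw [max_eq_right (pvM_nonneg deck s), pvM_eq_pvChain]
    have hA : ∀ (sc : Int) (i : Char),
        (if pvMem ['7', i] deck then sc + 11
         else if pvMem ['6', i] deck then sc + 8
         else if pvMem ['A', i] deck then sc + 6
         else if pvMem ['5', i] deck then sc + 5
         else if pvMem ['4', i] deck then sc + 4
         else if pvMem ['3', i] deck then sc + 3
         else if pvMem ['2', i] deck then sc + 2
         else sc) = sc + pvChain deck i := by
      intro sc i; unfold pvChain; split_ifs <;> ring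
    simp only [List.foldl_cons, List.foldl_nil, List.map_cons, List.map_nil,
               List.sum_cons, List.sum_nil, hA,
               hB 's' (by decide), hB 'c' (by decide), hB 'd' (by decide), hB 'h' (by decide)]
    ring
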